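-- pv_equiv track=rewrite | github.com/brockobill/ADL | AdelePractice/adele_python_scripting_practice1.13.py | SameAge
-- ===== SOURCE A (Python) =====
-- from collections import Counter
--
-- def SameAge(people):
--
--     values = people.values()
--     value_count = Counter(values)
--
--     if len(value_count) >= 2 :
--         # Extract values from the dictionary
--         values = list(people.values())
--
--         # Generate pairs of indices for values
--         index_pairs = [(i, j) for i in range(len(values))
--                     for j in range(i + 1, len(values))]
--
--         # Check if any two values are the same
--         for i, j in index_pairs:
--             if values[i] == values[j]:
--                 return True  # Return True if any pair has equal values
--             if values[i] >= values[j]*2: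
--                 return True # Return True if any pair has double values
--
--
--     return False  # Return False if no pair has equal values
-- ===== SOURCE B (Python) =====
-- def SameAge(people):
--     values = list(people.values())
--     if len(set(values)) < 2:
--         return False
--     seen = set()
--     running_max = None
--     for v in values:
--         if v in seen:
--             return True
--         if running_max is not None and running_max >= 2 * v:
--             return True
--         seen.add(v)
--         if running_max is None or v > running_max:
--             running_max = v
--     return False
-- ===== Notes on version B (the rewrite author's own statement) =====
-- stated objective: faster
-- what changed: replaces the materialised quadratic list of index pairs and the pairwise scan by a single left-to-right pass that keeps a set of seen ages (detects an equal pair) and the running maximum of the prefix (detects an earlier age >= twice the current one).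
import Mathlib
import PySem

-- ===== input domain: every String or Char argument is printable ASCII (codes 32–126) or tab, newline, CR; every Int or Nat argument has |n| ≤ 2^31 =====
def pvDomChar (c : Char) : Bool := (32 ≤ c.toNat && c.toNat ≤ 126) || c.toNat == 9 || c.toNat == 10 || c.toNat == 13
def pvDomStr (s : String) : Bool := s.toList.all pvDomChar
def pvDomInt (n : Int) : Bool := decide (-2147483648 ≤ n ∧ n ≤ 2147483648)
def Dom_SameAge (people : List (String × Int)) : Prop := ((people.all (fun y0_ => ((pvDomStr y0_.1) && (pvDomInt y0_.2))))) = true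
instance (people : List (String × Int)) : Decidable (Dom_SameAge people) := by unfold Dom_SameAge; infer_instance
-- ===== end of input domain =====

-- B replaces A's materialised quadratic list of index pairs and pairwise scan by one
-- left-to-right pass keeping the set of seen ages and the running maximum (objective: faster).


-- ===== PORT A =====
-- A's early-return loop over the pre-built index pairs
def pairLoopA (values : List Int) : List (Int × Int) → Bool
  | [] => false
  | (i, j) :: rest =>
    if PySem.List.pyGetD values i 0 = PySem.List.pyGetD values j 0 then true
    else if PySem.List.pyGetD values i 0 ≥ PySem.List.pyGetD values j 0 * 2 then true
    else pairLoopA values rest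

def SameAge (people : List (String × Int)) : Bool :=
  let values0 := (PySem.Dict.ofList people).values
  let valueCount := PySem.Dict.counter values0
  if 2 ≤ PySem.Dict.size valueCount then
    let values := (PySem.Dict.ofList people).values
    let indexPairs :=
      (PySem.List.pyRange 0 (PySem.List.len values) 1).flatMap
        (fun i => (PySem.List.pyRange (i + 1) (PySem.List.len values) 1).map (fun j => (i, j)))
    pairLoopA values indexPairs
  else false

-- ===== PORT B =====
-- B's single pass: seen-set + running maximum, early return
def loopB : List Int → PySem.Set Int → Option Int → Bool
  | [], _, _ => false
  | v :: rest, seen, runningMax =>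
    if PySem.Set.contains seen v then true
    else if (match runningMax with | some m => decide (m ≥ 2 * v) | none => false) then true
    else loopB rest (PySem.Set.add seen v)
      (match runningMax with
       | none => some v
       | some m => if v > m then some v else some m)

def SameAge_alt (people : List (String × Int)) : Bool :=
  let values := (PySem.Dict.ofList people).values
  if (PySem.Set.ofList values).length < 2 then false
  else loopB values PySem.Set.empty none

-- ===== PRECONDITION & SPEC =====
def Spec_SameAge (people : List (String × Int)) (out : Bool) : Prop := out = SameAge_alt people
instance (people : List (String × Int)) (out : Bool) : Decidable (Spec_SameAge people out) := by unfold Spec_SameAge; infer_instance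

-- ===== CLAIM (what is proved, stated in full; the proofs are below) =====
def Claim_equal_SameAge : Prop := ∀ (people : List (String × Int)), Dom_SameAge people → Spec_SameAge people (SameAge people)

-- ===== LEMMAS AND PROOFS =====

-- the common existence form both loops decide
def ExPair (vs : List Int) : Prop :=
  ∃ i j : Nat, ∃ hj : j < vs.length, ∃ hi : i < j,
    vs[i]'(hi.trans hj) = vs[j] ∨ vs[j] * 2 ≤ vs[i]'(hi.trans hj)

-- A's loop is an any over the pair list
lemma pairLoopA_eq_any (vs : List Int) (ps : List (Int × Int)) :
    pairLoopA vs ps = ps.any (fun p =>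
      decide (PySem.List.pyGetD vs p.1 0 = PySem.List.pyGetD vs p.2 0) ||
      decide (PySem.List.pyGetD vs p.1 0 ≥ PySem.List.pyGetD vs p.2 0 * 2)) := by
  induction ps with
  | nil => rfl
  | cons p rest ih =>
    obtain ⟨i, j⟩ := p
    simp only [pairLoopA, List.any_cons, ← ih]
    split_ifs with h1 h2 <;> simp_all

lemma pairLoopA_iff (vs : List Int) :
    pairLoopA vs ((PySem.List.pyRange 0 (PySem.List.len vs) 1).flatMap
        (fun i => (PySem.List.pyRange (i + 1) (PySem.List.len vs) 1).map (fun j => (i, j)))) = true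
      ↔ ExPair vs := by
  rw [pairLoopA_eq_any]
  simp only [List.any_eq_true, List.mem_flatMap, List.mem_map, PySem.List.mem_pyRange_one,
    PySem.List.len_eq, Bool.or_eq_true, decide_eq_true_eq]
  constructor
  · rintro ⟨p, ⟨i, ⟨hi0, hilen⟩, j, ⟨hij, hjlen⟩, rfl⟩, hcond⟩
    have hi' : 0 ≤ i := hi0
    have hj' : 0 ≤ j := le_trans (by omega) hij
    refine ⟨i.toNat, j.toNat, by omega, by omega, ?_⟩
    rw [PySem.List.pyGetD_eq_getElem vs 0 hi' (by omega),
        PySem.List.pyGetD_eq_getElem vs 0 hj' (by omega)] at hcond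
    exact hcond
  · rintro ⟨i, j, hj, hij, hcond⟩
    refine ⟨((i : Int), (j : Int)), ⟨(i : Int), ⟨by omega, by omega⟩, (j : Int), ⟨by omega, by omega⟩, rfl⟩, ?_⟩
    rw [PySem.List.pyGetD_eq_getElem vs (i := (i : Int)) 0 (by omega) (by exact_mod_cast hj.trans_le' hij.le),
        PySem.List.pyGetD_eq_getElem vs (i := (j : Int)) 0 (by omega) (by exact_mod_cast hj)]
    simpa using hcond

-- shifting one processed element from the list into the prefix
lemma shift_iff (v : Int) (rest pre : List Int) (hseen : v ∉ pre)
    (hnodbl : ∀ m ∈ pre, ¬ 2 * v ≤ m) :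
    (∃ j : Nat, ∃ hj : j < rest.length,
        rest[j] ∈ (pre ++ [v]) ++ rest.take j ∨ ∃ m ∈ (pre ++ [v]) ++ rest.take j, rest[j] * 2 ≤ m)
      ↔ (∃ j : Nat, ∃ hj : j < (v :: rest).length,
        (v :: rest)[j] ∈ pre ++ (v :: rest).take j ∨
          ∃ m ∈ pre ++ (v :: rest).take j, (v :: rest)[j] * 2 ≤ m) := by
  constructor
  · rintro ⟨j, hj, hcase⟩
    refine ⟨j + 1, by simpa using hj, ?_⟩
    simpa [List.append_assoc] using hcase
  · rintro ⟨j, hj, hcase⟩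
    match j with
    | 0 =>
      exfalso
      simp only [List.take_zero, List.append_nil, List.getElem_cons_zero] at hcase
      rcases hcase with h | ⟨m, hm, h2⟩
      · exact hseen h
      · exact hnodbl m hm (by omega)
    | j + 1 =>
      refine ⟨j, by simpa using hj, ?_⟩
      simpa [List.append_assoc] using hcase

-- B's loop invariant: seen = set of the processed prefix, runningMax = its maximum
lemma loopB_spec (vs : List Int) : ∀ (pre : List Int) (runningMax : Option Int),
    (∀ m, runningMax = some m → m ∈ pre ∧ ∀ x ∈ pre, x ≤ m) →
    (runningMax = none → pre = []) →
    (loopB vs (PySem.Set.ofList pre) runningMax = true ↔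
      ∃ j : Nat, ∃ hj : j < vs.length,
        vs[j] ∈ pre ++ vs.take j ∨ ∃ m ∈ pre ++ vs.take j, vs[j] * 2 ≤ m) := by
  induction vs with
  | nil => intro pre rmax _ _; simp [loopB]
  | cons v rest ih =>
    intro pre rmax hmax hnone
    simp only [loopB, PySem.Set.contains_eq_decide, PySem.Set.mem_ofList]
    by_cases hseen : v ∈ pre
    · simp only [hseen, decide_true, if_true, true_iff]
      exact ⟨0, by simp, by simpa using Or.inl hseen⟩
    · simp only [hseen, decide_false, Bool.false_eq_true, if_false]
      rcases rmax with _ | m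
      · have hpre := hnone rfl
        subst hpre
        rw [show (if (match (none : Option Int) with
              | some m => decide (m ≥ 2 * v) | none => false) = true then true
            else loopB rest ((PySem.Set.ofList ([] : List Int)).add v) (some v)) =
            loopB rest ((PySem.Set.ofList ([] : List Int)).add v) (some v) from by simp]
        rw [← PySem.Set.ofList_append_singleton,
          ih ([] ++ [v]) (some v) (by intro m hm; cases hm; simp) (by intro h; cases h)]
        exact shift_iff v rest [] (by simp) (by simp)
      · obtain ⟨hm, hall⟩ := hmax m rfl
        by_cases hdbl : 2 * v ≤ m
        · rw [if_pos (by simpa using hdbl)]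
          simp only [true_iff]
          exact ⟨0, by simp, Or.inr ⟨m, by simpa using hm, by simpa using by omega⟩⟩
        · rw [if_neg (by simpa using hdbl)]
          rw [← PySem.Set.ofList_append_singleton,
            ih (pre ++ [v]) (if v > m then some v else some m)
              (by
                intro mm hmm
                split at hmm <;> cases hmm
                · refine ⟨by simp, ?_⟩
                  intro x hx
                  rcases List.mem_append.mp hx with h | h
                  · have := hall x h; omega
                  · simp only [List.mem_singleton] at h; omega
                · refine ⟨by simp [hm], ?_⟩
                  intro x hx
                  rcases List.mem_append.mp hx with h | h
                  · exact hall x h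
                  · simp only [List.mem_singleton] at h; omega)
              (by intro h; split at h <;> cases h)]
          exact shift_iff v rest pre hseen
            (fun x hx h2 => hdbl (le_trans h2 (hall x hx)))

-- the prefix form is the pair form
lemma exB_iff_exPair (vs : List Int) :
    (∃ j : Nat, ∃ hj : j < vs.length,
        vs[j] ∈ ([] : List Int) ++ vs.take j ∨ ∃ m ∈ ([] : List Int) ++ vs.take j, vs[j] * 2 ≤ m)
      ↔ ExPair vs := by
  simp only [List.nil_append, List.mem_take_iff_getElem]
  constructor
  · rintro ⟨j, hj, hcase⟩
    rcases hcase with ⟨i, hi, heq⟩ | ⟨m, ⟨i, hi, rfl⟩, h2⟩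
    · exact ⟨i, j, hj, by omega, Or.inl heq⟩
    · exact ⟨i, j, hj, by omega, Or.inr h2⟩
  · rintro ⟨i, j, hj, hij, hcase⟩
    rcases hcase with heq | h2
    · exact ⟨j, hj, Or.inl ⟨i, by omega, heq⟩⟩
    · exact ⟨j, hj, Or.inr ⟨_, ⟨i, by omega, rfl⟩, h2⟩⟩

-- the two distinct-count guards agree
lemma guards_eq (vs : List Int) :
    PySem.Dict.size (PySem.Dict.counter vs) = (PySem.Set.ofList vs).length := by
  have h := PySem.Dict.items_counter vs
  simp [PySem.Dict.size, h]

-- ===== VERDICT (by name: the statement is the Claim_ definition above) =====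
theorem SameAge_spec : Claim_equal_SameAge := by
  intro people _
  unfold Spec_SameAge SameAge SameAge_alt
  set vs := (PySem.Dict.ofList people).values with hvs
  simp only
  rw [guards_eq vs]
  by_cases hg : 2 ≤ (PySem.Set.ofList vs).length
  · rw [if_pos hg, if_neg (by omega)]
    have hB := loopB_spec vs [] none (by rintro m ⟨⟩) (fun _ => rfl)
    rw [show PySem.Set.ofList ([] : List Int) = PySem.Set.empty from rfl] at hB
    cases hb : loopB vs PySem.Set.empty none with
    | false =>
      have hnot : ¬ ExPair vs := fun h => by
        rw [hB.mpr ((exB_iff_exPair vs).mpr h)] at hb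
        cases hb
      cases ha : pairLoopA vs ((PySem.List.pyRange 0 (PySem.List.len vs) 1).flatMap
        (fun i => (PySem.List.pyRange (i + 1) (PySem.List.len vs) 1).map (fun j => (i, j)))) with
      | false => rfl
      | true => exact absurd ((pairLoopA_iff vs).mp ha) hnot
    | true => rw [(pairLoopA_iff vs).mpr ((exB_iff_exPair vs).mp (hB.mp hb))]
  · rw [if_neg hg, if_pos (by omega)]
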